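-- pv_equiv track=rewrite | github.com/pypi-data/pypi-mirror-401 | packages/stanlogic/stanlogic-2.1.0-py3-none-any.whl/stanlogic/kmapsolver3D.py | _simplify_extra_vars
-- ===== SOURCE A (Python) =====
-- def _simplify_extra_vars(extra_combos):
--     """
--     Simplify the extra variable portion by finding common patterns.
--
--     Args:
--         extra_combos: List of binary strings for extra variables
--
--     Returns:
--         str: Simplified pattern with '-' for varying bits
--     """
--     if not extra_combos:
--         return ""
--
--     if len(extra_combos) == 1:
--         return extra_combos[0]
--
--     # Compare all combinations to find varying positions
--     bits = list(extra_combos[0])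
--     for combo in extra_combos[1:]:
--         for i in range(len(bits)):
--             if bits[i] != combo[i]:
--                 bits[i] = '-'
--
--     return "".join(bits)
-- ===== SOURCE B (Python) =====
-- def _simplify_extra_vars(extra_combos):
--     if not extra_combos:
--         return ""
--     first = extra_combos[0]
--     if len(extra_combos) == 1:
--         return first
--     rest = extra_combos[1:]
--     return "".join(
--         b if all(combo[i] == b for combo in rest) else '-'
--         for i, b in enumerate(first))
-- ===== Notes on version B (the rewrite author's own statement) =====
-- stated objective: idiomatic
-- what changed: Inverts the loop nesting: instead of A's row-wise fold that mutates a running bits list per combo, B builds the result column-wise in one join, emitting first[i] when every other combo agrees at position i and '-' otherwise.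
import Mathlib
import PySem

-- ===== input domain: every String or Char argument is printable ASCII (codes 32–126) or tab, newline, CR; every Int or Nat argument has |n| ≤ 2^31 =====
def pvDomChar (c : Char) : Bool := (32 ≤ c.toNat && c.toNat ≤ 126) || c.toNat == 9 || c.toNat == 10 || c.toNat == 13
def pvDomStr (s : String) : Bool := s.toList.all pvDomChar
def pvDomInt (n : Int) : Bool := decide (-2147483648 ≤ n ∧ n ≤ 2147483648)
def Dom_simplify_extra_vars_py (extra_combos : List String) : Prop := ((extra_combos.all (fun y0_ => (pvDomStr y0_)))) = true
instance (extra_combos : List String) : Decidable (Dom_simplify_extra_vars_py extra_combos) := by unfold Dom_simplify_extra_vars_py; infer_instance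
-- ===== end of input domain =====

-- B inverts A's loop nesting (column-wise join instead of a mutated running bits list); same cost, more idiomatic.
-- ===== PORT A =====
-- inner 'for i in range(len(bits)): if bits[i] != combo[i]: bits[i] = '-'' as a positional map over bits
def pvStepA (combo : String) (bits : List Char) : List Char :=
  bits.mapIdx (fun i b => if PySem.Str.pyGet? combo (Int.ofNat i) = some b then b else '-')

def simplify_extra_vars_py (extra_combos : List String) : String :=
  match extra_combos with
  | [] => ""
  | first :: rest =>
    if (first :: rest : List String).length = 1 then first
    else String.ofList (rest.foldl (fun bits combo => pvStepA combo bits) first.toList)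

-- ===== PORT B =====
def simplify_extra_vars_py_alt (extra_combos : List String) : String :=
  match extra_combos with
  | [] => ""
  | first :: rest =>
    if (first :: rest : List String).length = 1 then first
    else String.ofList (first.toList.mapIdx (fun i b =>
      if rest.all (fun combo => PySem.Str.pyGet? combo (Int.ofNat i) == some b) then b else '-'))

-- ===== PRECONDITION & SPEC =====
-- Pre_ excludes exactly the ragged inputs on which A raises IndexError: a combo shorter than the first string.
def Pre_simplify_extra_vars_py (extra_combos : List String) : Prop :=
  ∀ s ∈ extra_combos, (extra_combos.headD "").length ≤ s.length
instance (extra_combos : List String) : Decidable (Pre_simplify_extra_vars_py extra_combos) := by unfold Pre_simplify_extra_vars_py; infer_instance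

def pvWitness_simplify_extra_vars_py : List String := (["101", "111", "100"])

def Spec_simplify_extra_vars_py (extra_combos : List String) (out : String) : Prop := out = simplify_extra_vars_py_alt extra_combos
instance (extra_combos : List String) (out : String) : Decidable (Spec_simplify_extra_vars_py extra_combos out) := by unfold Spec_simplify_extra_vars_py; infer_instance

-- ===== CLAIM (what is proved, stated in full; the proofs are below) =====
def Claim_equal_simplify_extra_vars_py : Prop := ∀ (extra_combos : List String), Dom_simplify_extra_vars_py extra_combos → Pre_simplify_extra_vars_py extra_combos → Spec_simplify_extra_vars_py extra_combos (simplify_extra_vars_py extra_combos)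

-- ===== LEMMAS AND PROOFS =====

theorem pvStepA_length (combo : String) (bits : List Char) :
    (pvStepA combo bits).length = bits.length := by
  simp [pvStepA]

theorem pvFold_length (rest : List String) (bits : List Char) :
    (rest.foldl (fun bits combo => pvStepA combo bits) bits).length = bits.length := by
  induction rest generalizing bits with
  | nil => rfl
  | cons c cs ih => simp [List.foldl, ih, pvStepA_length]

theorem pvStepA_getElem? (c : String) (bits : List Char) (i : Nat) :
    (pvStepA c bits)[i]? = bits[i]?.map
      (fun b => if PySem.Str.pyGet? c (Int.ofNat i) = some b then b else '-') := by
  simp [pvStepA, List.getElem?_mapIdx]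

theorem pvFold_getElem? (rest : List String) (bits : List Char) (i : Nat) :
    (rest.foldl (fun bits combo => pvStepA combo bits) bits)[i]? =
      bits[i]?.map (fun b =>
        if rest.all (fun combo => PySem.Str.pyGet? combo (Int.ofNat i) == some b) then b
        else '-') := by
  induction rest generalizing bits with
  | nil => cases hb : bits[i]? <;> simp [hb]
  | cons c cs ih =>
    rw [List.foldl_cons, ih (pvStepA c bits), pvStepA_getElem?, Option.map_map]
    cases hb : bits[i]? with
    | none => rfl
    | some b =>
      simp only [Option.map_some, Function.comp, List.all_cons]
      by_cases h : PySem.Str.pyGet? c (Int.ofNat i) = some b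
      · have h' : c.toList[i]? = some b := by simpa using h
        simp [h']
      · have h' : ¬ c.toList[i]? = some b := by simpa using h
        have hfail : (PySem.Str.pyGet? c (Int.ofNat i) == some b) = false := by
          simpa using h'
        simp only [if_neg h, hfail, Bool.false_and]
        congr 1
        split <;> rfl

theorem simplify_extra_vars_py_spec : Claim_equal_simplify_extra_vars_py := by
  intro extra_combos _ _
  unfold Spec_simplify_extra_vars_py
  match extra_combos with
  | [] => rfl
  | first :: rest =>
    unfold simplify_extra_vars_py simplify_extra_vars_py_alt
    by_cases h1 : (first :: rest : List String).length = 1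
    · simp [h1]
    · simp only [if_neg h1]
      congr 1
      apply List.ext_getElem
      · simp [pvFold_length]
      · intro i hi hi2
        have h := pvFold_getElem? rest first.toList i
        rw [List.getElem?_eq_getElem hi, List.getElem?_eq_getElem (by simpa using hi2)] at h
        simp only [Option.map_some, Option.some.injEq] at h
        rw [h, List.getElem_mapIdx]
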